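-- pv_equiv track=rewrite | github.com/Snigdha171106/gfg-60days-npci | Day-33.py | countBSTs
-- ===== SOURCE A (Python) =====
-- from math import comb
--
-- def countBSTs(arr):
--     """
--     arr: list of distinct integers
--     return: list where ith element = number of BSTs with arr[i] as root
--     """
--     def catalan(n):
--         return comb(2 * n, n) // (n + 1)
--
--     result = []
--     for root in arr:
--         left_count = sum(1 for x in arr if x < root)
--         right_count = sum(1 for x in arr if x > root)
--         result.append(catalan(left_count) * catalan(right_count))
--     return result
-- ===== SOURCE B (Python) =====
-- from math import comb
--
-- def countBSTs(arr):
--     def catalan(n):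
--         return comb(2 * n, n) // (n + 1)
--     n = len(arr)
--     lo = {}
--     hi = {}
--     for i, v in enumerate(sorted(arr)):
--         if v not in lo:
--             lo[v] = i
--         hi[v] = i + 1
--     memo = {}
--     def cat(k):
--         if k not in memo:
--             memo[k] = catalan(k)
--         return memo[k]
--     return [cat(lo[v]) * cat(n - hi[v]) for v in arr]
-- ===== Notes on version B (the rewrite author's own statement) =====
-- stated objective: faster
-- what changed: Replaces the two O(n) comparison scans per root by one sort with first/last-occurrence rank dicts built in a single pass, and memoizes the catalan values so each distinct subtree size is computed once.
import Mathlib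
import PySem

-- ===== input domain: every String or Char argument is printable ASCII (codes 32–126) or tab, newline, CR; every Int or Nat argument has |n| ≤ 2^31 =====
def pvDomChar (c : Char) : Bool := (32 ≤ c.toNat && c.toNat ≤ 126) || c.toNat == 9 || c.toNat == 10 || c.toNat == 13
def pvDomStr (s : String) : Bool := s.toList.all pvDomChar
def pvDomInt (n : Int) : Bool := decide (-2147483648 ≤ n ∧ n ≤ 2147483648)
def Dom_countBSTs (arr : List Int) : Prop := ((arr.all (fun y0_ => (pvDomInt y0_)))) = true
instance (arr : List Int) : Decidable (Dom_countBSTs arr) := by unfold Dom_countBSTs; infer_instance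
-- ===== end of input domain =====

-- B replaces A's two O(n) comparison scans per root by one sort with first/last-occurrence
-- rank dictionaries and a memo for the catalan values (objective: faster, measured by the check).

-- ===== PORT A =====
-- catalan(n) = comb(2*n, n) // (n+1); every call receives a count n ≥ 0, where
-- Nat.choose is exact for math.comb and the floor division is Python-exact via PySem.
def pvCatalanA (n : Int) : Int :=
  PySem.Int.floordiv ((Nat.choose (2 * n).toNat n.toNat : Nat) : Int) (n + 1)

def countBSTs (arr : List Int) : List Int :=
  arr.foldl (fun result root =>
    let left_count : Int := (arr.map (fun x => if x < root then (1 : Int) else 0)).sum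
    let right_count : Int := (arr.map (fun x => if root < x then (1 : Int) else 0)).sum
    result ++ [pvCatalanA left_count * pvCatalanA right_count]) []

-- ===== PORT B =====
def pvCatalanB (n : Int) : Int :=
  PySem.Int.floordiv ((Nat.choose (2 * n).toNat n.toNat : Nat) : Int) (n + 1)

-- cat(k): 'if k not in memo: memo[k] = catalan(k); return memo[k]' — returns (memo, value)
def pvCat (memo : PySem.Dict Int Int) (k : Int) : PySem.Dict Int Int × Int :=
  let memo := if memo.contains k then memo else memo.insert k (pvCatalanB k)
  (memo, memo.getD k 0)

def countBSTs_alt (arr : List Int) : List Int :=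
  let n : Int := PySem.List.len arr
  let lh := (PySem.List.enumerate (PySem.List.sorted arr (fun x => x) false)).foldl
      (fun (p : PySem.Dict Int Int × PySem.Dict Int Int) iv =>
        (if p.1.contains iv.2 then p.1 else p.1.insert iv.2 iv.1,
         p.2.insert iv.2 (iv.1 + 1)))
      (PySem.Dict.empty, PySem.Dict.empty)
  (arr.foldl (fun (st : PySem.Dict Int Int × List Int) v =>
      let r1 := pvCat st.1 (lh.1.getD v 0)
      let r2 := pvCat r1.1 (n - lh.2.getD v 0)
      (r2.1, st.2 ++ [r1.2 * r2.2]))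
    (PySem.Dict.empty, [])).2

-- ===== PRECONDITION & SPEC =====
def Spec_countBSTs (arr : List Int) (out : List Int) : Prop := out = countBSTs_alt arr
instance (arr : List Int) (out : List Int) : Decidable (Spec_countBSTs arr out) := by unfold Spec_countBSTs; infer_instance

-- ===== CLAIM (what is proved, stated in full; the proofs are below) =====
def Claim_equal_countBSTs : Prop := ∀ (arr : List Int), Dom_countBSTs arr → Spec_countBSTs arr (countBSTs arr)

-- ===== LEMMAS AND PROOFS =====

theorem pvCatalan_eq : pvCatalanA = pvCatalanB := rfl

-- A in map form
theorem countBSTs_eq_map (arr : List Int) :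
    countBSTs arr = arr.map (fun root =>
      pvCatalanA ((arr.countP (fun x => x < root) : Nat) : Int) *
      pvCatalanA ((arr.countP (fun x => root < x) : Nat) : Int)) := by
  unfold countBSTs
  rw [PySem.List.foldl_append_singleton_eq_map]
  simp only [List.nil_append]
  have h1 : ∀ (p : Int → Prop) [DecidablePred p],
      (List.map (fun x => if p x then (1:Int) else 0) arr).sum
        = ((arr.countP (fun x => decide (p x)) : Nat) : Int) := by
    intro p _
    rw [← PySem.List.sum_map_ite_one_zero (fun x => decide (p x)) arr]
    congr 1
    apply List.map_congr_left; intro x _; by_cases h : p x <;> simp [h]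
  congr 1; funext root
  rw [h1 (fun x => x < root), h1 (fun x => root < x)]

-- memo invariant: every stored value is the catalan of its key
def pvMemoInv (m : PySem.Dict Int Int) : Prop := ∀ k v, m.get? k = some v → v = pvCatalanB k

theorem pvCat_eq (m : PySem.Dict Int Int) (k : Int) (h : pvMemoInv m) :
    (pvCat m k).2 = pvCatalanB k ∧ pvMemoInv (pvCat m k).1 := by
  unfold pvCat
  rcases hc : m.contains k with _ | _
  · simp only [Bool.false_eq_true, if_false]
    refine ⟨PySem.Dict.getD_of_get?_eq_some _ 0 (PySem.Dict.get?_insert_self m k (pvCatalanB k)), ?_⟩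
    intro k' v' hg
    by_cases hk : k' = k
    · subst hk; rw [PySem.Dict.get?_insert_self] at hg; exact (Option.some.inj hg).symm
    · rw [PySem.Dict.get?_insert_of_ne m (pvCatalanB k) hk] at hg; exact h k' v' hg
  · simp only [if_true]
    refine ⟨?_, h⟩
    rcases hg : m.get? k with _ | v
    · rw [PySem.Dict.contains_eq_isSome_get?, hg] at hc; simp at hc
    · rw [PySem.Dict.getD_of_get?_eq_some m 0 hg]; exact h k v hg

-- the memoized output loop is a map
theorem pvFoldCat_eq (g1 g2 : Int → Int) (l : List Int) (m : PySem.Dict Int Int)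
    (acc : List Int) (h : pvMemoInv m) :
    (l.foldl (fun (st : PySem.Dict Int Int × List Int) v =>
      let r1 := pvCat st.1 (g1 v)
      let r2 := pvCat r1.1 (g2 v)
      (r2.1, st.2 ++ [r1.2 * r2.2])) (m, acc)).2
    = acc ++ l.map (fun v => pvCatalanB (g1 v) * pvCatalanB (g2 v)) := by
  induction l generalizing m acc with
  | nil => simp
  | cons v t ih =>
    simp only [List.foldl_cons, List.map_cons]
    obtain ⟨h1, hm1⟩ := pvCat_eq m (g1 v) h
    obtain ⟨h2, hm2⟩ := pvCat_eq (pvCat m (g1 v)).1 (g2 v) hm1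
    rw [ih _ _ hm2, h1, h2]
    simp

-- the rank-dict loop over an ascending list: first occurrence index = #(< v), last+1 = #(≤ v)
theorem pvRankFold (s : List Int) (st : Int) (lo0 hi0 : PySem.Dict Int Int)
    (hs : s.Pairwise (· ≤ ·)) (v : Int) :
    (((PySem.List.enumerate s st).foldl
      (fun (p : PySem.Dict Int Int × PySem.Dict Int Int) iv =>
        (if p.1.contains iv.2 then p.1 else p.1.insert iv.2 iv.1,
         p.2.insert iv.2 (iv.1 + 1)))
      (lo0, hi0)).1.get? v
        = if v ∈ s ∧ lo0.contains v = false then some (st + (s.countP (fun x => x < v) : Nat))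
          else lo0.get? v)
    ∧ (((PySem.List.enumerate s st).foldl
      (fun (p : PySem.Dict Int Int × PySem.Dict Int Int) iv =>
        (if p.1.contains iv.2 then p.1 else p.1.insert iv.2 iv.1,
         p.2.insert iv.2 (iv.1 + 1)))
      (lo0, hi0)).2.get? v
        = if v ∈ s then some (st + (s.countP (fun x => x ≤ v) : Nat)) else hi0.get? v) := by
  induction s generalizing st lo0 hi0 with
  | nil => simp [PySem.List.enumerate]
  | cons hd t ih =>
    have hhd : ∀ x ∈ t, hd ≤ x := (List.pairwise_cons.mp hs).1
    have hpt : t.Pairwise (· ≤ ·) := (List.pairwise_cons.mp hs).2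
    rw [PySem.List.enumerate_cons, List.foldl_cons]
    dsimp only
    obtain ⟨ihl, ihr⟩ := ih (st + 1)
      (if lo0.contains hd = true then lo0 else lo0.insert hd st) (hi0.insert hd (st + 1)) hpt
    constructor
    · rw [ihl]
      by_cases hv : v = hd
      · subst hv
        have hc1 : (if lo0.contains v = true then lo0 else lo0.insert v st).contains v = true := by
          by_cases h0 : lo0.contains v = true
          · simp [h0]
          · rw [Bool.not_eq_true] at h0
            simp only [h0, Bool.false_eq_true, if_false]
            exact PySem.Dict.contains_insert_self lo0 v st
        simp only [hc1, Bool.true_eq_false, and_false, if_false]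
        by_cases h0 : lo0.contains v = true
        · simp [h0]
        · rw [Bool.not_eq_true] at h0
          simp only [h0, Bool.false_eq_true, if_false, List.mem_cons, true_or, true_and, if_true]
          rw [PySem.Dict.get?_insert_self]
          have hz : (v :: t).countP (fun x => x < v) = 0 := by
            apply List.countP_eq_zero.mpr
            intro x hx
            rcases List.mem_cons.mp hx with h | h
            · simp [h]
            · simpa using not_lt.mpr (hhd x h)
          rw [hz]; simp
      · have hcv : (if lo0.contains hd = true then lo0 else lo0.insert hd st).contains v
            = lo0.contains v := by
          by_cases h0 : lo0.contains hd = true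
          · simp [h0]
          · rw [Bool.not_eq_true] at h0
            simp only [h0, Bool.false_eq_true, if_false]
            rw [PySem.Dict.contains_insert]
            simp [hv]
        have hgv : (if lo0.contains hd = true then lo0 else lo0.insert hd st).get? v
            = lo0.get? v := by
          by_cases h0 : lo0.contains hd = true
          · simp [h0]
          · rw [Bool.not_eq_true] at h0
            simp only [h0, Bool.false_eq_true, if_false]
            exact PySem.Dict.get?_insert_of_ne lo0 st hv
        rw [hcv, hgv]
        simp only [List.mem_cons, hv, false_or]
        by_cases hvt : v ∈ t
        · by_cases h0 : lo0.contains v = false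
          · simp only [hvt, h0, and_self, if_true]
            have hlt : hd < v := lt_of_le_of_ne (hhd v hvt) (fun h => hv h.symm)
            have hcc : (hd :: t).countP (fun x => x < v) = t.countP (fun x => x < v) + 1 := by
              rw [List.countP_cons]
              simp [hlt, Nat.add_comm]
            rw [hcc]; congr 1; push_cast; ring
          · simp [hvt, h0]
        · simp [hvt]
    · rw [ihr]
      by_cases hvt : v ∈ t
      · have hle : hd ≤ v := hhd v hvt
        simp only [hvt, if_true, List.mem_cons, or_true]
        have hcc : (hd :: t).countP (fun x => x ≤ v) = t.countP (fun x => x ≤ v) + 1 := by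
          rw [List.countP_cons]
          simp [hle, Nat.add_comm]
        rw [hcc]; congr 1; push_cast; ring
      · by_cases hv : v = hd
        · subst hv
          simp only [hvt, if_false, List.mem_cons, true_or, if_true]
          rw [PySem.Dict.get?_insert_self]
          have hcc : (v :: t).countP (fun x => x ≤ v) = 1 := by
            rw [List.countP_cons]
            have hz : t.countP (fun x => x ≤ v) = 0 := by
              apply List.countP_eq_zero.mpr
              intro x hx
              have hne : x ≠ v := fun h => hvt (h ▸ hx)
              simpa using not_le.mpr (lt_of_le_of_ne (hhd x hx) (fun h => hne h.symm))
            simp [hz]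
          rw [hcc]; simp
        · simp only [List.mem_cons, hv, false_or, hvt, if_false]
          exact PySem.Dict.get?_insert_of_ne hi0 (st + 1) hv

-- ===== VERDICT (by name: the statement is the Claim_ definition above) =====
theorem countBSTs_spec : Claim_equal_countBSTs := by
  unfold Claim_equal_countBSTs
  intro arr _
  unfold Spec_countBSTs countBSTs_alt
  rw [pvFoldCat_eq _ _ arr PySem.Dict.empty []
    (fun k v hg => by rw [PySem.Dict.get?_empty] at hg; cases hg)]
  rw [countBSTs_eq_map]
  simp only [List.nil_append]
  apply List.map_congr_left
  intro v hv
  have hpw : (PySem.List.sorted arr (fun x => x) false).Pairwise (· ≤ ·) :=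
    PySem.List.sorted_pairwise arr (fun x => x)
  obtain ⟨hlo, hhi⟩ := pvRankFold (PySem.List.sorted arr (fun x => x) false) 0
    PySem.Dict.empty PySem.Dict.empty hpw v
  have hvs : v ∈ PySem.List.sorted arr (fun x => x) false :=
    (PySem.List.mem_sorted arr (fun x => x) false v).mpr hv
  have hperm := PySem.List.sorted_perm arr (fun x => x) false
  rw [if_pos ⟨hvs, PySem.Dict.contains_empty v⟩] at hlo
  rw [if_pos hvs] at hhi
  rw [hperm.countP_eq] at hlo hhi
  have hgl := PySem.Dict.getD_of_get?_eq_some _ 0 hlo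
  have hgh := PySem.Dict.getD_of_get?_eq_some _ 0 hhi
  rw [hgl, hgh, PySem.List.len_eq]
  have hsplit : arr.length = arr.countP (fun x => decide (v < x)) + arr.countP (fun x => decide (x ≤ v)) := by
    rw [List.length_eq_countP_add_countP (fun x => decide (v < x))]
    congr 1
    apply List.countP_congr
    intro x _
    simp [not_lt]
  have h1 : (0 : Int) + (arr.countP (fun x => decide (x < v)) : Nat) = ((arr.countP (fun x => x < v) : Nat) : Int) := by
    simp
  rw [h1]
  show pvCatalanA _ * pvCatalanA _ = pvCatalanB _ * pvCatalanB _
  rw [← pvCatalan_eq]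
  have h2 : (arr.length : Int) - ((0 : Int) + (arr.countP (fun x => decide (x ≤ v)) : Nat))
      = ((arr.countP (fun x => decide (v < x)) : Nat) : Int) := by omega
  rw [h2]
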